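-- pv_equiv track=rewrite | github.com/LivInTheLookingGlass/Thue-Morse | code/pn/d06.py | xor_in_n
-- ===== SOURCE A (Python) =====
-- def xor_in_n(a, b, n):
--     if min(a, b) < 1:
--         return max(a, b)
--     res = 0
--     ni = 1
--     while a > 0 or b > 0:
--         a_digit = a % n
--         b_digit = b % n
--         res += ((a_digit - b_digit) % n) * ni
--         a //= n
--         b //= n
--         ni *= n
--     return res
-- ===== SOURCE B (Python) =====
-- def xor_in_n(a, b, n):
--     if min(a, b) < 1:
--         return max(a, b)
--     da = []
--     t = a
--     while t > 0:
--         da.append(t % n)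
--         t //= n
--     db = []
--     t = b
--     while t > 0:
--         db.append(t % n)
--         t //= n
--     total = 0
--     for i in reversed(range(max(len(da), len(db)))):
--         x = da[i] if i < len(da) else 0
--         y = db[i] if i < len(db) else 0
--         total = total * n + (x - y) % n
--     return total
-- ===== Notes on version B (the rewrite author's own statement) =====
-- stated objective: alternative
-- what changed: A's single interleaved loop that divides a and b together while accumulating (a%n - b%n)%n times a running power ni is replaced by two independent base-n digit-extraction loops (least-significant first) followed by a zero-padded most-significant-first Horner combine pass.
import Mathlib
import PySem

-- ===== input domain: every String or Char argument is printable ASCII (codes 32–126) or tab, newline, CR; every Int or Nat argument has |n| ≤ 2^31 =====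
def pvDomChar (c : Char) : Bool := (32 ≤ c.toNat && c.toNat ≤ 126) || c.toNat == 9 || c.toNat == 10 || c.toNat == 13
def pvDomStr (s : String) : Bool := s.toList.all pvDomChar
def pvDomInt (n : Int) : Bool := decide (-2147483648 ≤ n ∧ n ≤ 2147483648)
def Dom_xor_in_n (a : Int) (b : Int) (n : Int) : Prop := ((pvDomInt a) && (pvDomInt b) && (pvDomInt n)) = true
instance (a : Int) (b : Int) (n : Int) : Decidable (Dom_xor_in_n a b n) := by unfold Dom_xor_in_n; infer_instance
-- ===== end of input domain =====

-- B replaces A's single interleaved divide-and-accumulate loop by two digit-extraction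
-- loops plus a most-significant-first Horner combine (objective: alternative decomposition).

-- ===== PORT A =====
-- A's while-loop; the fuel a.natAbs + b.natAbs + 1 only makes the same computation total
-- (it suffices for every input admitted by Pre_xor_in_n; the loop stops early at the condition).
def xorLoopA : Nat → Int → Int → Int → Int → Int → Int
  | 0, _, _, _, res, _ => res
  | f+1, a, b, n, res, ni =>
    if a > 0 ∨ b > 0 then
      xorLoopA f (PySem.Int.floordiv a n) (PySem.Int.floordiv b n) n
        (res + PySem.Int.mod (PySem.Int.mod a n - PySem.Int.mod b n) n * ni) (ni * n)
    else res

def xor_in_n (a : Int) (b : Int) (n : Int) : Int :=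
  if min a b < 1 then max a b
  else xorLoopA (a.natAbs + b.natAbs + 1) a b n 0 1

-- ===== PORT B =====
-- Source B's digit-extraction while-loop (least-significant first); fuel t.natAbs + 1 makes it total.
def digitsB : Nat → Int → Int → List Int
  | 0, _, _ => []
  | f+1, t, n => if t > 0 then PySem.Int.mod t n :: digitsB f (PySem.Int.floordiv t n) n else []

-- Source B's combine pass: for i in reversed(range(max(len(da), len(db)))): total = total*n + (x-y)%n
def combineB (da : List Int) (db : List Int) (n : Int) : Int :=
  ((List.range (max da.length db.length)).reverse).foldl
    (fun total i =>
      total * n + PySem.Int.mod ((if i < da.length then da.getD i 0 else 0)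
                               - (if i < db.length then db.getD i 0 else 0)) n) 0

def xor_in_n_alt (a : Int) (b : Int) (n : Int) : Int :=
  if min a b < 1 then max a b
  else combineB (digitsB (a.natAbs + 1) a n) (digitsB (b.natAbs + 1) b n) n

-- ===== PRECONDITION & SPEC =====
-- Pre_ excludes only the inputs where A returns nothing: with a ≥ 1 and b ≥ 1, n = 0 raises
-- ZeroDivisionError and n = 1 loops forever; every input on which A returns a value is admitted.
def Pre_xor_in_n (a : Int) (b : Int) (n : Int) : Prop := min a b < 1 ∨ n ≤ -1 ∨ 2 ≤ n
instance (a : Int) (b : Int) (n : Int) : Decidable (Pre_xor_in_n a b n) := by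
  unfold Pre_xor_in_n; infer_instance

def pvWitness_xor_in_n : Int × Int × Int := (5, 3, 2)

def Spec_xor_in_n (a : Int) (b : Int) (n : Int) (out : Int) : Prop := out = xor_in_n_alt a b n
instance (a : Int) (b : Int) (n : Int) (out : Int) : Decidable (Spec_xor_in_n a b n out) := by
  unfold Spec_xor_in_n; infer_instance

-- ===== CLAIM (what is proved, stated in full; the proofs are below) =====
def Claim_equal_xor_in_n : Prop := ∀ (a : Int) (b : Int) (n : Int), Dom_xor_in_n a b n → Pre_xor_in_n a b n → Spec_xor_in_n a b n (xor_in_n a b n)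

-- ===== LEMMAS AND PROOFS =====

-- arithmetic facts about floor division
theorem floordiv_nonneg_of_pos {t n : Int} (hn : 0 < n) (ht : 0 ≤ t) :
    0 ≤ PySem.Int.floordiv t n := by
  rw [PySem.Int.floordiv_eq_ediv_of_pos hn]
  exact Int.ediv_nonneg ht (le_of_lt hn)

theorem floordiv_lt_self_of_two_le {t n : Int} (hn : 2 ≤ n) (ht : 0 < t) :
    PySem.Int.floordiv t n < t := by
  rw [PySem.Int.floordiv_eq_ediv_of_pos (by omega)]
  have h1 := Int.emod_nonneg t (show n ≠ 0 by omega)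
  have h2 := Int.emod_lt_of_pos t (show 0 < n by omega)
  have h3 := Int.mul_ediv_add_emod t n
  by_contra h
  push Not at h
  nlinarith

theorem floordiv_nonpos_of_neg {t n : Int} (hn : n ≤ -1) (ht : 1 ≤ t) :
    PySem.Int.floordiv t n ≤ 0 := by
  have hmod := PySem.Int.mod_neg_bounds t (b := n) (by omega)
  have hid := PySem.Int.floordiv_mul_add_mod t n
  by_contra h
  push Not at h
  have : PySem.Int.floordiv t n * n ≤ -1 := by nlinarith
  omega

theorem floordiv_zero_of_pos {n : Int} (hn : 0 < n) : PySem.Int.floordiv 0 n = 0 := by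
  rw [PySem.Int.floordiv_eq_ediv_of_pos hn]; simp

theorem mod_zero_left_of_pos {n : Int} (hn : 0 < n) : PySem.Int.mod 0 n = 0 := by
  rw [PySem.Int.mod_eq_emod_of_pos hn]; simp

-- digitsB is fuel-irrelevant once the fuel exceeds t.natAbs (for a positive base)
theorem digitsB_irrel {n : Int} (hn : 2 ≤ n) :
    ∀ (f g : Nat) (t : Int), 0 ≤ t → t.natAbs < f → t.natAbs < g →
      digitsB f t n = digitsB g t n := by
  intro f
  induction f with
  | zero => intro g t _ hf _; omega
  | succ f ih =>
    intro g t ht hf hg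
    match g with
    | 0 => omega
    | g+1 =>
      simp only [digitsB]
      by_cases htpos : t > 0
      · rw [if_pos htpos, if_pos htpos]
        have h1 : PySem.Int.floordiv t n < t := floordiv_lt_self_of_two_le hn htpos
        have h2 : 0 ≤ PySem.Int.floordiv t n := floordiv_nonneg_of_pos (by omega) ht
        rw [ih g (PySem.Int.floordiv t n) h2 (by omega) (by omega)]
      · rw [if_neg htpos, if_neg htpos]

theorem digitsB_nonpos {f : Nat} {t n : Int} (ht : t ≤ 0) : digitsB f t n = [] := by
  cases f with
  | zero => rfl
  | succ f => simp only [digitsB]; rw [if_neg (by omega)]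

-- padded lookup shifts to the tail
theorem padGet_succ_tail (l : List Int) (i : Nat) :
    (if i + 1 < l.length then l.getD (i + 1) 0 else 0)
      = (if i < l.tail.length then l.tail.getD i 0 else 0) := by
  cases l with
  | nil => simp
  | cons x xs => simp

-- one step of the Horner combine: peel off position 0
theorem combineB_step (da db : List Int) (n : Int)
    (h : 0 < max da.length db.length) :
    combineB da db n
      = combineB da.tail db.tail n * n
        + PySem.Int.mod ((if 0 < da.length then da.getD 0 0 else 0)
                       - (if 0 < db.length then db.getD 0 0 else 0)) n := by
  obtain ⟨m, hm⟩ : ∃ m, max da.length db.length = m + 1 :=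
    ⟨max da.length db.length - 1, by omega⟩
  have htails : max da.tail.length db.tail.length = m := by
    simp only [List.length_tail]; omega
  unfold combineB
  rw [hm, htails, List.range_succ_eq_map, List.reverse_cons, List.map_reverse.symm,
      List.foldl_append]
  simp only [List.foldl_map, List.foldl_cons, List.foldl_nil]
  congr 2
  apply PySem.List.foldl_congr_mem
  intro acc i _
  rw [show i.succ = i + 1 from rfl, padGet_succ_tail da i, padGet_succ_tail db i]

theorem combineB_nil_nil (n : Int) : combineB [] [] n = 0 := rfl

-- the value B computes from a's and b's digit lists, as a function of a and b
def coreFn (a b n : Int) : Int :=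
  combineB (digitsB (a.natAbs + 1) a n) (digitsB (b.natAbs + 1) b n) n

theorem digitsB_unfold {t n : Int} (hn : 2 ≤ n) (ht : 0 < t) :
    digitsB (t.natAbs + 1) t n
      = PySem.Int.mod t n :: digitsB ((PySem.Int.floordiv t n).natAbs + 1) (PySem.Int.floordiv t n) n := by
  have h1 : PySem.Int.floordiv t n < t := floordiv_lt_self_of_two_le hn ht
  have h2 : 0 ≤ PySem.Int.floordiv t n := floordiv_nonneg_of_pos (by omega) (le_of_lt ht)
  have hstep : digitsB (t.natAbs + 1) t n
      = PySem.Int.mod t n :: digitsB t.natAbs (PySem.Int.floordiv t n) n := by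
    simp only [digitsB]
    rw [if_pos ht]
  rw [hstep, digitsB_irrel hn t.natAbs ((PySem.Int.floordiv t n).natAbs + 1)
        (PySem.Int.floordiv t n) h2 (by omega) (by omega)]

-- B's core recurrence, matching one iteration of A's loop
theorem coreFn_rec {a b n : Int} (hn : 2 ≤ n) (ha : 0 ≤ a) (hb : 0 ≤ b)
    (hpos : a > 0 ∨ b > 0) :
    coreFn a b n
      = coreFn (PySem.Int.floordiv a n) (PySem.Int.floordiv b n) n * n
        + PySem.Int.mod (PySem.Int.mod a n - PySem.Int.mod b n) n := by
  unfold coreFn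
  have key : ∀ t : Int, 0 ≤ t →
      (digitsB (t.natAbs + 1) t n).tail
        = digitsB ((PySem.Int.floordiv t n).natAbs + 1) (PySem.Int.floordiv t n) n ∧
      (if 0 < (digitsB (t.natAbs + 1) t n).length
         then (digitsB (t.natAbs + 1) t n).getD 0 0 else 0) = PySem.Int.mod t n := by
    intro t ht
    by_cases htp : 0 < t
    · rw [digitsB_unfold hn htp]; simp
    · have ht0 : t = 0 := by omega
      subst ht0
      rw [digitsB_nonpos (by omega), floordiv_zero_of_pos (by omega),
          mod_zero_left_of_pos (by omega)]
      exact ⟨(digitsB_nonpos (by omega)).symm, by simp⟩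
  obtain ⟨hta, hha⟩ := key a ha
  obtain ⟨htb, hhb⟩ := key b hb
  have hlen : 0 < max (digitsB (a.natAbs + 1) a n).length (digitsB (b.natAbs + 1) b n).length := by
    rcases hpos with hpa | hpb
    · rw [digitsB_unfold hn hpa]; simp
    · rw [digitsB_unfold hn hpb]; simp
  rw [combineB_step _ _ _ hlen, hta, htb, hha, hhb]

theorem coreFn_zero (n : Int) : coreFn 0 0 n = 0 := by
  unfold coreFn
  rw [digitsB_nonpos (by omega)]
  exact combineB_nil_nil n

-- A's loop computes res + ni * coreFn a b n once the fuel exceeds a.natAbs + b.natAbs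
theorem loopA_eq {n : Int} (hn : 2 ≤ n) :
    ∀ (fuel k : Nat) (a b res ni : Int), 0 ≤ a → 0 ≤ b →
      a.natAbs + b.natAbs ≤ k → k < fuel →
      xorLoopA fuel a b n res ni = res + ni * coreFn a b n := by
  intro fuel
  induction fuel with
  | zero => intro k a b res ni _ _ _ hk; omega
  | succ f ih =>
    intro k a b res ni ha hb hsum hk
    simp only [xorLoopA]
    by_cases hpos : a > 0 ∨ b > 0
    · rw [if_pos hpos]
      have ha' : 0 ≤ PySem.Int.floordiv a n := floordiv_nonneg_of_pos (by omega) ha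
      have hb' : 0 ≤ PySem.Int.floordiv b n := floordiv_nonneg_of_pos (by omega) hb
      have hdec : (PySem.Int.floordiv a n).natAbs + (PySem.Int.floordiv b n).natAbs
          < a.natAbs + b.natAbs := by
        rcases hpos with hpa | hpb
        · have h1 : PySem.Int.floordiv a n < a := floordiv_lt_self_of_two_le hn hpa
          have h2 : PySem.Int.floordiv b n ≤ b := by
            by_cases hpb : 0 < b
            · exact le_of_lt (floordiv_lt_self_of_two_le hn hpb)
            · have : b = 0 := by omega
              subst this
              rw [floordiv_zero_of_pos (by omega)]
          omega
        · have h1 : PySem.Int.floordiv b n < b := floordiv_lt_self_of_two_le hn hpb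
          have h2 : PySem.Int.floordiv a n ≤ a := by
            by_cases hpa : 0 < a
            · exact le_of_lt (floordiv_lt_self_of_two_le hn hpa)
            · have : a = 0 := by omega
              subst this
              rw [floordiv_zero_of_pos (by omega)]
          omega
      have hk1 : 1 ≤ a.natAbs + b.natAbs := by
        rcases hpos with hpa | hpb <;> omega
      rw [ih (k - 1) _ _ _ _ ha' hb' (by omega) (by omega)]
      rw [coreFn_rec hn ha hb hpos]
      ring
    · rw [if_neg hpos]
      have ha0 : a = 0 := by omega
      have hb0 : b = 0 := by omega
      subst ha0; subst hb0
      rw [coreFn_zero]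
      ring

-- with a negative base, one floor division already makes both values nonpositive,
-- so both A's loop and B's extraction handle exactly one digit
theorem xorLoopA_stop {f : Nat} {a b n res ni : Int} (ha : a ≤ 0) (hb : b ≤ 0) :
    xorLoopA f a b n res ni = res := by
  cases f with
  | zero => rfl
  | succ f => simp only [xorLoopA]; rw [if_neg (by omega)]

theorem neg_base_A {a b n : Int} (hn : n ≤ -1) (ha : 1 ≤ a) (hb : 1 ≤ b) :
    xorLoopA (a.natAbs + b.natAbs + 1) a b n 0 1
      = PySem.Int.mod (PySem.Int.mod a n - PySem.Int.mod b n) n := by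
  obtain ⟨f, hf⟩ : ∃ f, a.natAbs + b.natAbs + 1 = f + 1 := ⟨a.natAbs + b.natAbs, rfl⟩
  rw [hf]
  simp only [xorLoopA]
  rw [if_pos (by omega)]
  rw [xorLoopA_stop (floordiv_nonpos_of_neg hn ha) (floordiv_nonpos_of_neg hn hb)]
  ring

theorem digitsB_neg_base {t n : Int} (hn : n ≤ -1) (ht : 1 ≤ t) :
    digitsB (t.natAbs + 1) t n = [PySem.Int.mod t n] := by
  obtain ⟨f, hf⟩ : ∃ f, t.natAbs + 1 = f + 1 := ⟨t.natAbs, rfl⟩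
  rw [hf]
  simp only [digitsB]
  rw [if_pos (by omega), digitsB_nonpos (floordiv_nonpos_of_neg hn ht)]

theorem combineB_single (x y n : Int) :
    combineB [x] [y] n = PySem.Int.mod (x - y) n := by
  unfold combineB
  simp [List.range_succ]

-- ===== VERDICT (by name: the statement is the Claim_ definition above) =====
theorem xor_in_n_spec : Claim_equal_xor_in_n := by
  intro a b n _ hpre
  unfold Spec_xor_in_n xor_in_n xor_in_n_alt
  by_cases hmin : min a b < 1
  · rw [if_pos hmin, if_pos hmin]
  · rw [if_neg hmin, if_neg hmin]
    have ha : 1 ≤ a := by simp only [min_lt_iff] at hmin; omega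
    have hb : 1 ≤ b := by simp only [min_lt_iff] at hmin; omega
    rcases hpre with h | h | h
    · exact absurd h hmin
    · rw [neg_base_A h ha hb, digitsB_neg_base h ha, digitsB_neg_base h hb,
          combineB_single]
    · rw [loopA_eq h (a.natAbs + b.natAbs + 1) (a.natAbs + b.natAbs) a b 0 1
            (by omega) (by omega) (le_refl _) (by omega)]
      show (0 : Int) + 1 * coreFn a b n = _
      unfold coreFn
      ring
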